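-- pv_equiv track=rewrite | github.com/avasyutkin/term_6 | GUI/Матричный_шифр.py | message_to_vector
-- ===== SOURCE A (Python) =====
-- def message_to_vector(message, key):
--     if int(len(message) % int(key[0])) > 0:
--         message_vector = [[0] * int(key[0]) for i in range(int(len(message) / int(key[0])) + 1)]
--     else:
--         message_vector = [[0] * int(key[0]) for i in range(int(len(message) / int(key[0])))]
--
--     k = 0
--     for i in range(len(message_vector)):
--         for j in range(int(key[0])):
--             if k < len(message):
--                 message_vector[i][j] = message[k]
--             else:
--                 message_vector[i][j] = 0
--             k = k + 1
--
--     return message_vector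
-- ===== SOURCE B (Python) =====
-- def message_to_vector(message, key):
--     w = int(key[0])
--     q, r = divmod(len(message), w)
--     rows = q + 1 if r else q
--     padded = list(message) + [0] * (rows * w - len(message))
--     return [padded[i * w:(i + 1) * w] for i in range(rows)]
-- ===== Notes on version B (the rewrite author's own statement) =====
-- stated objective: simpler
-- what changed: B replaces A's nested index-filling loops over a preallocated zero matrix (with a running cell counter k) by a pad-then-slice decomposition: build one flat zero-padded list and cut it into width-sized slices.
import Mathlib
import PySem

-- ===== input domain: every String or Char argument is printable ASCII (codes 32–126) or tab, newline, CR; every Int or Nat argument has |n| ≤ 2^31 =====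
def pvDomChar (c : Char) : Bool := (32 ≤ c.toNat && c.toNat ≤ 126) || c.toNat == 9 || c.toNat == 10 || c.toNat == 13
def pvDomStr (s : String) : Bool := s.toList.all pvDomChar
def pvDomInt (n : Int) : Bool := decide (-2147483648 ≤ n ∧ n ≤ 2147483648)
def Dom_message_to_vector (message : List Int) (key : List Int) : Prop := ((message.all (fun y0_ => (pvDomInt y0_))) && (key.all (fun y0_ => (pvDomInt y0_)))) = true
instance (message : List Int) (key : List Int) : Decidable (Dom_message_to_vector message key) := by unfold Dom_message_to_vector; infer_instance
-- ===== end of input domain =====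

-- B replaces A's nested index-filling loops by pad-then-slice (objective: simpler).

-- ===== PORT A =====
-- body of A's inner loop: message_vector[i][j] = message[k] if k < len(message) else 0; k = k + 1
def pvFillCell (msg : List Int) (i : Nat) (st : List (List Int) × Nat) (j : Nat) : List (List Int) × Nat :=
  let v : Int := if st.2 < msg.length then msg.getD st.2 0 else 0
  (st.1.set i ((st.1.getD i []).set j v), st.2 + 1)

-- A's inner 'for j in range(int(key[0]))' loop ([0]*negative and range(negative) are empty, so .toNat is faithful)
def pvFillRow (msg : List Int) (W : Nat) (st : List (List Int) × Nat) (i : Nat) : List (List Int) × Nat :=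
  (List.range W).foldl (pvFillCell msg i) st

def message_to_vector (message : List Int) (key : List Int) : List (List Int) :=
  let w : Int := (PySem.List.pyGet? key 0).getD 0   -- key[0]; IndexError on [] is excluded by Pre_
  let len : Int := (message.length : Int)
  -- int(len(message) / w): Python's true division truncated by int() = truncation toward zero = Int.tdiv (exact for list lengths)
  let rows : Int := if PySem.Int.mod len w > 0 then Int.tdiv len w + 1 else Int.tdiv len w
  let init : List (List Int) := (List.range rows.toNat).map (fun _ => List.replicate w.toNat 0)
  ((List.range init.length).foldl (pvFillRow message w.toNat) (init, 0)).1

-- ===== PORT B =====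
def message_to_vector_alt (message : List Int) (key : List Int) : List (List Int) :=
  let w : Int := (PySem.List.pyGet? key 0).getD 0
  let qr : Int × Int := (PySem.Int.divmod? (message.length : Int) w).getD (0, 0)
  let rows : Int := if qr.2 ≠ 0 then qr.1 + 1 else qr.1
  let padded : List Int := message ++ List.replicate (rows * w - (message.length : Int)).toNat 0
  (List.range rows.toNat).map fun (i : Nat) =>
    PySem.List.slice padded (some ((i : Int) * w)) (some (((i : Int) + 1) * w))

-- ===== PRECONDITION & SPEC =====
-- Pre_ excludes exactly the inputs where A raises: key = [] (IndexError on key[0]) and key[0] = 0 (ZeroDivisionError).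
def Pre_message_to_vector (message : List Int) (key : List Int) : Prop :=
  key ≠ [] ∧ key.headI ≠ 0
instance (message : List Int) (key : List Int) : Decidable (Pre_message_to_vector message key) := by
  unfold Pre_message_to_vector; infer_instance

def pvWitness_message_to_vector : List Int × List Int := ([1, 2, 3], [2])

def Spec_message_to_vector (message : List Int) (key : List Int) (out : List (List Int)) : Prop := out = message_to_vector_alt message key
instance (message : List Int) (key : List Int) (out : List (List Int)) : Decidable (Spec_message_to_vector message key out) := by unfold Spec_message_to_vector; infer_instance

-- ===== CLAIM (what is proved, stated in full; the proofs are below) =====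
def Claim_equal_message_to_vector : Prop := ∀ (message : List Int) (key : List Int), Dom_message_to_vector message key → Pre_message_to_vector message key → Spec_message_to_vector message key (message_to_vector message key)

-- ===== LEMMAS AND PROOFS =====

-- the intended result: row i, column j holds message[i*W+j] if in range, else 0
def pvRow (msg : List Int) (W i : Nat) : List Int :=
  (List.range W).map (fun j => msg.getD (i * W + j) 0)

def pvGrid (msg : List Int) (W R : Nat) : List (List Int) :=
  (List.range R).map (fun i => pvRow msg W i)

lemma pv_if_getD (msg : List Int) (k : Nat) :
    (if k < msg.length then msg.getD k 0 else 0) = msg.getD k 0 := by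
  split
  · rfl
  · rw [List.getD_eq_getElem?_getD, List.getElem?_eq_none (by omega)]; rfl

lemma pv_inner (msg : List Int) (W i : Nat) (st : List (List Int)) (hi : i < st.length)
    (hrow : st.getD i [] = List.replicate W 0) (j : Nat) (hj : j ≤ W) :
    (List.range j).foldl (pvFillCell msg i) (st, i * W) =
      (st.set i ((List.range W).map (fun t => if t < j then msg.getD (i * W + t) 0 else 0)),
        i * W + j) := by
  induction j with
  | zero =>
      simp only [List.range_zero, List.foldl_nil, Nat.add_zero]
      have : (List.range W).map (fun t => if t < 0 then msg.getD (i * W + t) 0 else 0) =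
          List.replicate W 0 := by
        rw [List.eq_replicate_iff]; simp
      rw [this, ← hrow, List.getD_eq_getElem?_getD, List.getElem?_eq_getElem hi]
      simp
  | succ j ih =>
      rw [List.range_succ, List.foldl_append, ih (by omega), List.foldl_cons, List.foldl_nil]
      unfold pvFillCell
      have hset : ∀ (x : List Int), (st.set i x).getD i [] = x := by
        intro x
        rw [List.getD_eq_getElem?_getD, List.getElem?_set_self (by omega)]; rfl
      simp only [hset, List.set_set, pv_if_getD]
      refine Prod.ext ?_ (by simp; omega)
      simp only
      congr 1
      apply List.ext_getElem
      · simp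
      · intro t h1 h2
        simp only [List.length_set, List.length_map, List.length_range] at h1
        rw [List.getElem_set]
        simp only [List.getElem_map, List.getElem_range]
        by_cases ht : j = t
        · subst ht; simp
        · simp only [if_neg ht]
          by_cases h3 : t < j
          · rw [if_pos h3, if_pos (by omega)]
          · rw [if_neg h3, if_neg (by omega)]

lemma pv_inner_full (msg : List Int) (W i : Nat) (st : List (List Int)) (hi : i < st.length)
    (hrow : st.getD i [] = List.replicate W 0) :
    pvFillRow msg W (st, i * W) i = (st.set i (pvRow msg W i), i * W + W) := by
  unfold pvFillRow
  rw [pv_inner msg W i st hi hrow W (le_refl W)]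
  congr 2
  unfold pvRow
  apply List.map_congr_left
  intro t ht
  rw [if_pos (List.mem_range.mp ht)]

lemma pv_outer (msg : List Int) (W R m : Nat) (hm : m ≤ R) :
    (List.range m).foldl (pvFillRow msg W)
        ((List.range R).map (fun _ => List.replicate W 0), 0) =
      ((List.range R).map (fun i => if i < m then pvRow msg W i else List.replicate W 0),
        m * W) := by
  induction m with
  | zero => simp
  | succ m ih =>
      rw [List.range_succ, List.foldl_append, ih (by omega), List.foldl_cons, List.foldl_nil]
      have hlen : ((List.range R).map
          (fun i => if i < m then pvRow msg W i else List.replicate W 0)).length = R := by simp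
      have hrow : ((List.range R).map
          (fun i => if i < m then pvRow msg W i else List.replicate W 0)).getD m [] =
          List.replicate W 0 := by
        rw [List.getD_eq_getElem?_getD, List.getElem?_eq_getElem (by simp; omega)]
        simp
      rw [pv_inner_full msg W m _ (by omega) hrow]
      refine Prod.ext ?_ (by simp [Nat.succ_mul])
      simp only
      apply List.ext_getElem
      · simp
      · intro t h1 h2
        simp only [List.length_set, List.length_map, List.length_range] at h1
        rw [List.getElem_set]
        simp only [List.getElem_map, List.getElem_range]
        by_cases ht : m = t
        · subst ht; simp
        · simp only [if_neg ht]
          by_cases h3 : t < m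
          · rw [if_pos h3, if_pos (by omega)]
          · rw [if_neg h3, if_neg (by omega)]

-- A's port computes the grid, for any width and row count
lemma pvA_eq_grid (msg key : List Int) :
    message_to_vector msg key =
      pvGrid msg ((PySem.List.pyGet? key 0).getD 0).toNat
        ((if PySem.Int.mod (msg.length : Int) ((PySem.List.pyGet? key 0).getD 0) > 0
            then Int.tdiv (msg.length : Int) ((PySem.List.pyGet? key 0).getD 0) + 1
            else Int.tdiv (msg.length : Int) ((PySem.List.pyGet? key 0).getD 0)).toNat) := by
  unfold message_to_vector
  simp only [List.length_map, List.length_range]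
  rw [pv_outer msg _ _ _ (le_refl _)]
  unfold pvGrid
  apply List.map_congr_left
  intro i hi
  rw [if_pos (List.mem_range.mp hi)]

lemma pv_padded_getElem (msg : List Int) (pad : Nat) (m : Nat)
    (hm : m < (msg ++ List.replicate pad 0).length) :
    (msg ++ List.replicate pad 0)[m] = msg.getD m 0 := by
  by_cases h : m < msg.length
  · rw [List.getElem_append_left h, List.getD_eq_getElem?_getD, List.getElem?_eq_getElem h]; rfl
  · rw [List.getElem_append_right (by omega), List.getElem_replicate,
      List.getD_eq_getElem?_getD, List.getElem?_eq_none (by omega)]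
    rfl

lemma pv_slice_chunk (msg : List Int) (pad W a : Nat)
    (hlen : a + W ≤ (msg ++ List.replicate pad 0).length) :
    PySem.List.slice (msg ++ List.replicate pad 0)
        (some ((a : Nat) : Int)) (some (((a + W : Nat)) : Int)) =
      (List.range W).map (fun j => msg.getD (a + j) 0) := by
  rw [PySem.List.slice_natCast]
  have hWW : a + W - a = W := by omega
  rw [hWW]
  apply List.ext_getElem
  · simp only [List.length_take, List.length_drop, List.length_map, List.length_range,
      List.length_append, List.length_replicate]
    simp only [List.length_append, List.length_replicate] at hlen
    omega
  · intro j h1 h2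
    simp only [List.length_take, List.length_drop] at h1
    rw [List.getElem_take, List.getElem_drop, pv_padded_getElem msg pad _ (by omega)]
    simp

-- B's row count, for stating pvB_def (proof helper)
def pvRowsB (msg key : List Int) : Int :=
  let qr : Int × Int :=
    (PySem.Int.divmod? (msg.length : Int) ((PySem.List.pyGet? key 0).getD 0)).getD (0, 0)
  if qr.2 ≠ 0 then qr.1 + 1 else qr.1

lemma pvB_def (msg key : List Int) :
    message_to_vector_alt msg key =
      (List.range (pvRowsB msg key).toNat).map (fun (i : Nat) =>
        PySem.List.slice
          (msg ++ List.replicate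
            (pvRowsB msg key * ((PySem.List.pyGet? key 0).getD 0) - (msg.length : Int)).toNat 0)
          (some ((i : Int) * ((PySem.List.pyGet? key 0).getD 0)))
          (some (((i : Int) + 1) * ((PySem.List.pyGet? key 0).getD 0)))) := rfl

-- ===== VERDICT (by name: the statement is the Claim_ definition above) =====
theorem message_to_vector_spec : Claim_equal_message_to_vector := by
  intro message key _ hpre
  obtain ⟨hk, hw0⟩ := hpre
  unfold Spec_message_to_vector
  have hget : (PySem.List.pyGet? key 0).getD 0 = key.headI := by
    cases key with
    | nil => exact absurd rfl hk
    | cons a l => simp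
  set w : Int := key.headI with hwdef
  set len : Int := (message.length : Int) with hlendef
  have hlen0 : 0 ≤ len := by positivity
  -- unfold B's divmod
  have hdm : (PySem.Int.divmod? len w).getD (0, 0) = (len.fdiv w, len.fmod w) := by
    unfold PySem.Int.divmod?
    rw [if_neg hw0]; rfl
  have hmoddef : PySem.Int.mod len w = len.fmod w := rfl
  rcases lt_or_gt_of_ne hw0 with hneg | hpos
  · -- w < 0 : both sides are []
    set w' : Int := -w with hw'def
    have hw'pos : 0 < w' := by omega
    have hediv : 0 ≤ len / w' := Int.ediv_nonneg hlen0 (by omega)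
    have hA : message_to_vector message key = [] := by
      rw [pvA_eq_grid, hget, ← hlendef]
      have hrows : (if PySem.Int.mod len w > 0
          then Int.tdiv len w + 1 else Int.tdiv len w).toNat = 0 := by
        have htd : Int.tdiv len w = len / w + (if 0 ≤ len ∨ w ∣ len then 0 else w.sign) :=
          Int.tdiv_eq_ediv
        have hem : len.fmod w = len % w + (if 0 ≤ w ∨ w ∣ len then 0 else w) :=
          Int.fmod_eq_emod
        have hdivneg : len / w = -(len / w') := by
          rw [hw'def, Int.ediv_neg, neg_neg]
        have hmod' : len % w = len % w' := by
          rw [hw'def, Int.emod_neg]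
        have hmodnn : 0 ≤ len % w' := Int.emod_nonneg len (by omega)
        have hmodlt : len % w' < w' := Int.emod_lt_of_pos len hw'pos
        have hdvd : w ∣ len ↔ len % w = 0 := Int.dvd_iff_emod_eq_zero
        have hmodle : ¬ (PySem.Int.mod len w > 0) := by
          rw [hmoddef]
          by_cases hd : w ∣ len
          · rw [hem, if_pos (Or.inr hd), add_zero, hdvd.mp hd]; omega
          · have hnor : ¬ (0 ≤ w ∨ w ∣ len) := fun hc => hc.elim (fun h => by omega) hd
            rw [hem, if_neg hnor, hmod']; omega
        have htd0 : (Int.tdiv len w).toNat = 0 := by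
          rw [htd, if_pos (Or.inl hlen0), add_zero, hdivneg]; omega
        rw [if_neg hmodle]; exact htd0
      rw [hrows]
      rfl
    have hB : message_to_vector_alt message key = [] := by
      rw [pvB_def]
      have hrows : (pvRowsB message key).toNat = 0 := by
        unfold pvRowsB
        rw [hget, ← hlendef, hdm]
        simp only
        have hfd : len.fdiv w = len / w - (if 0 ≤ w ∨ w ∣ len then 0 else 1) :=
          Int.fdiv_eq_ediv
        have hem : len.fmod w = len % w + (if 0 ≤ w ∨ w ∣ len then 0 else w) :=
          Int.fmod_eq_emod
        have hdivneg : len / w = -(len / w') := by rw [hw'def, Int.ediv_neg, neg_neg]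
        have hmod' : len % w = len % w' := by rw [hw'def, Int.emod_neg]
        have hmodnn : 0 ≤ len % w' := Int.emod_nonneg len (by omega)
        have hmodlt : len % w' < w' := Int.emod_lt_of_pos len hw'pos
        have hdvd : w ∣ len ↔ len % w = 0 := Int.dvd_iff_emod_eq_zero
        by_cases hd : w ∣ len
        · have hm0 : len.fmod w = 0 := by
            rw [hem, if_pos (Or.inr hd), add_zero, hdvd.mp hd]
          have hf : len.fdiv w = -(len / w') := by
            rw [hfd, if_pos (Or.inr hd), sub_zero, hdivneg]
          rw [hm0, hf, if_neg (by simp)]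
          omega
        · have hnor : ¬ (0 ≤ w ∨ w ∣ len) := fun hc => hc.elim (fun h => by omega) hd
          have hm : len.fmod w = len % w' + w := by rw [hem, if_neg hnor, hmod']
          have hf : len.fdiv w = -(len / w') - 1 := by rw [hfd, if_neg hnor, hdivneg]
          rw [hm, hf, if_pos (by omega)]
          omega
      rw [hrows]
      rfl
    rw [hA, hB]
  · -- w > 0
    set W : Nat := w.toNat with hWdef
    have hwW : w = (W : Nat) := by omega
    have hfd : len.fdiv w = len / w := Int.fdiv_eq_ediv_of_nonneg len (by omega)
    have hem : len.fmod w = len % w := by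
      rw [Int.fmod_eq_emod, if_pos (Or.inl (by omega)), add_zero]
    have htd : Int.tdiv len w = len / w := Int.tdiv_eq_ediv_of_nonneg hlen0
    have hmodnn : 0 ≤ len % w := Int.emod_nonneg len hw0
    have hmodlt : len % w < w := Int.emod_lt_of_pos len hpos
    have hqe : len = w * (len / w) + len % w := (Int.mul_ediv_add_emod len w).symm
    set rows : Int := if len % w ≠ 0 then len / w + 1 else len / w with hrowsdef
    have hrowsA : (if PySem.Int.mod len w > 0
        then Int.tdiv len w + 1 else Int.tdiv len w) = rows := by
      rw [hmoddef, hem, htd, hrowsdef]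
      by_cases h : len % w = 0
      · rw [if_neg (by omega), if_neg (by simpa using h)]
      · rw [if_pos (by omega), if_pos h]
    have hrowsnn : 0 ≤ rows := by
      rw [hrowsdef]
      have : 0 ≤ len / w := Int.ediv_nonneg hlen0 (by omega)
      split <;> omega
    have hlenle : len ≤ rows * w := by
      rw [hrowsdef]
      by_cases h : len % w = 0
      · rw [if_neg (by simpa using h)]; nlinarith [hqe]
      · rw [if_pos h]; nlinarith [hqe]
    set R : Nat := rows.toNat with hRdef
    have hrw : rows * w = ((R * W : Nat) : Int) := by
      push_cast
      rw [Int.toNat_of_nonneg hrowsnn, ← hwW]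
    -- padded length
    set pad : Nat := (rows * w - len).toNat with hpaddef
    have hplen : (message ++ List.replicate pad 0).length = R * W := by
      simp only [List.length_append, List.length_replicate]
      omega
    have hA : message_to_vector message key = pvGrid message W R := by
      rw [pvA_eq_grid, hget, ← hlendef, hrowsA, ← hWdef, ← hRdef]
    have hB : message_to_vector_alt message key = pvGrid message W R := by
      have hrowsB : pvRowsB message key = rows := by
        unfold pvRowsB
        rw [hget, ← hlendef, hdm]
        simp only
        rw [hfd, hem, hrowsdef]
      rw [pvB_def, hrowsB, hget, ← hlendef, ← hRdef, ← hpaddef]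
      unfold pvGrid
      apply List.map_congr_left
      intro i hi
      have hiR : i < R := List.mem_range.mp hi
      have h1 : (i : Int) * w = ((i * W : Nat) : Int) := by push_cast [hwW]; ring
      have h2 : ((i : Int) + 1) * w = ((i * W + W : Nat) : Int) := by push_cast [hwW]; ring
      rw [h1, h2]
      have hbound : i * W + W ≤ (message ++ List.replicate pad 0).length := by
        rw [hplen]
        calc i * W + W = (i + 1) * W := by ring
          _ ≤ R * W := Nat.mul_le_mul hiR (le_refl W)
      rw [pv_slice_chunk message pad W (i * W) hbound]
      rfl
    rw [hA, hB]
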